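-- pv_equiv track=rewrite | github.com/tomasz-solis/trackside-labs | src/utils/pit_strategy.py | _calculate_stint_lengths
-- ===== SOURCE A (Python) =====
-- def _calculate_stint_lengths(race_distance: int, pit_laps: list[int]) -> list[int]:
--     """Calculate lap count per stint from pit laps."""
--     if not pit_laps:
--         # No stops: entire race is one stint
--         return [race_distance]
--
--     stint_lengths = []
--
--     # First stint: laps 1 to first pit
--     stint_lengths.append(pit_laps[0])
--
--     # Middle stints: between pit stops
--     for i in range(1, len(pit_laps)):
--         stint_length = pit_laps[i] - pit_laps[i - 1]
--         stint_lengths.append(stint_length)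
--
--     # Final stint: last pit to finish
--     final_stint = race_distance - pit_laps[-1]
--     stint_lengths.append(final_stint)
--
--     return stint_lengths
-- ===== SOURCE B (Python) =====
-- def _calculate_stint_lengths(race_distance: int, pit_laps: list[int]) -> list[int]:
--     """Calculate lap count per stint from pit laps.
--
--     Divide and conquer: pick the middle pit lap as a pivot; the stints before
--     it are those of a race of distance pivot with the left pit laps, and the
--     stints after it are those of the remaining race rebased to start at the
--     pivot (shift right pit laps and distance by -pivot); concatenate.
--     """
--     if not pit_laps:
--         return [race_distance]
--     m = len(pit_laps) // 2
--     pivot = pit_laps[m]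
--     left = _calculate_stint_lengths(pivot, pit_laps[:m])
--     right = _calculate_stint_lengths(
--         race_distance - pivot, [p - pivot for p in pit_laps[m + 1:]]
--     )
--     return left + right
-- ===== Notes on version B (the rewrite author's own statement) =====
-- stated objective: alternative
-- what changed: Replaces A's single indexed loop over adjacent pit-lap differences with divide and conquer: split at the middle pit lap, solve the left half as a race of distance pivot, solve the right half rebased by -pivot, and concatenate; no adjacent-pair indexing or empty/first/final special cases remain.
import Mathlib
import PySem

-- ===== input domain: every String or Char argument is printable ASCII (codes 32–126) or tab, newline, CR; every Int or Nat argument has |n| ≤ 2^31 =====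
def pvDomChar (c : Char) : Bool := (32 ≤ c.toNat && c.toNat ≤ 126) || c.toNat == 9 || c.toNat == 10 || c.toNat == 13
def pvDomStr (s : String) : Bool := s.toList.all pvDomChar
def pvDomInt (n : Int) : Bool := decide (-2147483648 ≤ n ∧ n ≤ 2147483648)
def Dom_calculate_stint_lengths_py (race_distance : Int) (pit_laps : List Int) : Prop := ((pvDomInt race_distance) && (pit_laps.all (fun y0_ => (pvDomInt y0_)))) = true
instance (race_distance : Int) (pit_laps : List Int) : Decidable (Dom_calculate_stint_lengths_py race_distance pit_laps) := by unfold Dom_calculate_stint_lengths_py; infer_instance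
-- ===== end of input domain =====

-- B replaces A's indexed adjacent-difference loop with divide and conquer on the pit-lap list:
-- split at the middle pit lap, solve the left half, solve the right half rebased by -pivot, concatenate.

-- ===== PORT A =====
def calculate_stint_lengths_py (race_distance : Int) (pit_laps : List Int) : List Int :=
  if pit_laps = [] then
    [race_distance]
  else
    -- stint_lengths = []; stint_lengths.append(pit_laps[0])
    let s0 : List Int := [] ++ [PySem.List.pyGetD pit_laps 0 0]
    -- for i in range(1, len(pit_laps)): stint_lengths.append(pit_laps[i] - pit_laps[i-1])
    let s1 := (PySem.List.pyRange 1 (pit_laps.length : Int) 1).foldl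
      (fun acc i => acc ++ [PySem.List.pyGetD pit_laps i 0 - PySem.List.pyGetD pit_laps (i - 1) 0]) s0
    -- stint_lengths.append(race_distance - pit_laps[-1])
    s1 ++ [race_distance - PySem.List.pyGetD pit_laps (-1) 0]

-- ===== PORT B =====
-- pit_laps[:m] / pit_laps[m+1:] with 0 ≤ m < len are exactly take m / drop (m+1);
-- pit_laps[m] with 0 ≤ m < len is exactly getD m 0.
def calculate_stint_lengths_py_alt (race_distance : Int) (pit_laps : List Int) : List Int :=
  match pit_laps with
  | [] => [race_distance]
  | h :: t =>
    let m := (h :: t).length / 2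
    let pivot := (h :: t).getD m 0
    calculate_stint_lengths_py_alt pivot ((h :: t).take m) ++
      calculate_stint_lengths_py_alt (race_distance - pivot)
        (((h :: t).drop (m + 1)).map (fun p => p - pivot))
termination_by pit_laps.length
decreasing_by
  all_goals simp
  all_goals omega

-- ===== PRECONDITION & SPEC =====
def Spec_calculate_stint_lengths_py (race_distance : Int) (pit_laps : List Int) (out : List Int) : Prop := out = calculate_stint_lengths_py_alt race_distance pit_laps
instance (race_distance : Int) (pit_laps : List Int) (out : List Int) : Decidable (Spec_calculate_stint_lengths_py race_distance pit_laps out) := by unfold Spec_calculate_stint_lengths_py; infer_instance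

-- ===== CLAIM (what is proved, stated in full; the proofs are below) =====
def Claim_equal_calculate_stint_lengths_py : Prop := ∀ (race_distance : Int) (pit_laps : List Int), Dom_calculate_stint_lengths_py race_distance pit_laps → Spec_calculate_stint_lengths_py race_distance pit_laps (calculate_stint_lengths_py race_distance pit_laps)

-- ===== LEMMAS AND PROOFS =====

/-- Reference shape both ports are reduced to: consecutive differences from `prev`. -/
def pvDiffs (prev : Int) (l : List Int) (rd : Int) : List Int :=
  match l with
  | [] => [rd - prev]
  | x :: xs => (x - prev) :: pvDiffs x xs rd

/-- Shift invariance of consecutive differences. -/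
theorem pvDiffs_shift (c : Int) : ∀ (l : List Int) (prev rd : Int),
    pvDiffs (prev - c) (l.map (fun p => p - c)) (rd - c) = pvDiffs prev l rd := by
  intro l
  induction l with
  | nil => intro prev rd; simp only [List.map_nil, pvDiffs]; ring_nf
  | cons x xs ih =>
    intro prev rd
    simp only [List.map_cons, pvDiffs]
    rw [show x - c - (prev - c) = x - prev by ring, ih]

/-- Splitting consecutive differences at an interior boundary. -/
theorem pvDiffs_split (l2 : List Int) (pivot rd : Int) : ∀ (l1 : List Int) (prev : Int),
    pvDiffs prev (l1 ++ pivot :: l2) rd = pvDiffs prev l1 pivot ++ pvDiffs pivot l2 rd := by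
  intro l1
  induction l1 with
  | nil => intro prev; simp [pvDiffs]
  | cons x xs ih => intro prev; simp only [List.cons_append, pvDiffs, ih, List.cons_append]

/-- Adjacent-difference map plus final stint equals pvDiffs (used to characterise A). -/
theorem pvMid_last_eq_diffs (x rd : Int) (xs : List Int) :
    ((List.range xs.length).map (fun k => (x :: xs).getD (k + 1) 0 - (x :: xs).getD k 0))
      ++ [rd - (x :: xs).getLast (by simp)] = pvDiffs x xs rd := by
  induction xs generalizing x with
  | nil => simp [pvDiffs]
  | cons y ys ih =>
    have h := ih y
    simp only [List.length_cons, List.range_succ_eq_map, List.map_cons, List.map_map, pvDiffs]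
    simp only [Function.comp_def, Nat.succ_eq_add_one] at *
    rw [List.cons_append, List.getLast_cons (by simp)]
    simpa using h

/-- B computes the consecutive differences from 0 (induction on a length bound). -/
theorem pvAlt_eq_diffs_len (n : Nat) : ∀ (l : List Int), l.length ≤ n → ∀ rd : Int,
    calculate_stint_lengths_py_alt rd l = pvDiffs 0 l rd := by
  induction n with
  | zero =>
    intro l hlen rd
    have : l = [] := List.eq_nil_of_length_eq_zero (Nat.le_zero.mp hlen)
    subst this
    simp [calculate_stint_lengths_py_alt, pvDiffs]
  | succ n ih =>
    intro l hlen rd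
    match l with
    | [] => simp [calculate_stint_lengths_py_alt, pvDiffs]
    | y :: ys =>
      rw [calculate_stint_lengths_py_alt]
      have hm : (y :: ys).length / 2 < (y :: ys).length := by simp; omega
      have hdec : (y :: ys) = (y :: ys).take ((y :: ys).length / 2)
          ++ (y :: ys).getD ((y :: ys).length / 2) 0
            :: (y :: ys).drop ((y :: ys).length / 2 + 1) := by
        conv_lhs => rw [← List.take_append_drop ((y :: ys).length / 2) (y :: ys)]
        rw [List.drop_eq_getElem_cons hm, List.getD_eq_getElem (y :: ys) 0 hm]
      rw [ih _ (by simp at hlen ⊢; omega), ih _ (by simp at hlen ⊢; omega)]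
      have hshift := pvDiffs_shift ((y :: ys).getD ((y :: ys).length / 2) 0)
        ((y :: ys).drop ((y :: ys).length / 2 + 1))
        ((y :: ys).getD ((y :: ys).length / 2) 0) rd
      rw [sub_self] at hshift
      rw [hshift, ← pvDiffs_split]
      conv_rhs => rw [hdec]

theorem pvA_eq_diffs (rd x : Int) (xs : List Int) :
    calculate_stint_lengths_py rd (x :: xs) = x :: pvDiffs x xs rd := by
  unfold calculate_stint_lengths_py
  simp only [if_neg (List.cons_ne_nil x xs)]
  rw [PySem.List.foldl_append_singleton_eq_map]
  rw [PySem.List.pyRange_one]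
  have hlen : (((x :: xs).length : Int) - 1).toNat = xs.length := by simp
  rw [hlen, List.map_map]
  have hmap : (List.range xs.length).map
      ((fun i => PySem.List.pyGetD (x :: xs) i 0 - PySem.List.pyGetD (x :: xs) (i - 1) 0) ∘
        (fun k : Nat => (1 : Int) + k))
      = (List.range xs.length).map (fun k => (x :: xs).getD (k + 1) 0 - (x :: xs).getD k 0) := by
    refine List.map_congr_left (fun k _ => ?_)
    have h1 : (1 : Int) + (k : Int) = ((k + 1 : Nat) : Int) := by push_cast; ring
    have h2 : ((k + 1 : Nat) : Int) - 1 = ((k : Nat) : Int) := by push_cast; ring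
    simp only [Function.comp_def, h1, h2, PySem.List.pyGetD_natCast]
  rw [hmap]
  rw [PySem.List.pyGetD_neg_one (x :: xs) 0 (by simp)]
  have hx : PySem.List.pyGetD (x :: xs) 0 0 = x := by
    simp [PySem.List.pyGetD_zero_cons]
  rw [hx, List.append_assoc, pvMid_last_eq_diffs x rd xs]
  simp

-- ===== VERDICT (by name: the statement is the Claim_ definition above) =====
theorem calculate_stint_lengths_py_spec : Claim_equal_calculate_stint_lengths_py := by
  intro rd pl _
  unfold Spec_calculate_stint_lengths_py
  match pl with
  | [] => simp [calculate_stint_lengths_py, calculate_stint_lengths_py_alt]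
  | x :: xs =>
    rw [pvA_eq_diffs, pvAlt_eq_diffs_len (x :: xs).length (x :: xs) le_rfl rd]
    simp [pvDiffs]
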